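-- pv_equiv track=rewrite | github.com/SeyoungKimLab/PerturbNet | Python/partition_to_ordering.py | partition_to_ordering
-- ===== SOURCE A (Python) =====
-- def partition_to_ordering(parts, includezero=True):
--     num_items = len(parts)
--     num_parts = len(set(parts))
--     sorted_items = sorted(enumerate(parts), key=lambda x: x[1])
--     if includezero:
--         sorted_ixs = [x[0] for x in sorted_items]
--         sorted_parts = [x[1] for x in sorted_items]
--         return sorted_ixs
--     else:
--         sorted_ixs = [x[0] for x in sorted_items if x[1]>0]
--         return sorted_ixs
-- ===== SOURCE B (Python) =====
-- def partition_to_ordering(parts, includezero=True):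
--     buckets = {}
--     for i, v in enumerate(parts):
--         buckets.setdefault(v, []).append(i)
--     out = []
--     for v in sorted(buckets):
--         if includezero or v > 0:
--             out.extend(buckets[v])
--     return out
-- ===== Notes on version B (the rewrite author's own statement) =====
-- stated objective: alternative
-- what changed: Replaces the comparison sort of (index,value) pairs by a bucket decomposition: one pass groups indices by partition value in a dict (original order preserved within each bucket), then the buckets are concatenated in ascending key order, skipping non-positive keys when includezero is false.
import Mathlib
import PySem

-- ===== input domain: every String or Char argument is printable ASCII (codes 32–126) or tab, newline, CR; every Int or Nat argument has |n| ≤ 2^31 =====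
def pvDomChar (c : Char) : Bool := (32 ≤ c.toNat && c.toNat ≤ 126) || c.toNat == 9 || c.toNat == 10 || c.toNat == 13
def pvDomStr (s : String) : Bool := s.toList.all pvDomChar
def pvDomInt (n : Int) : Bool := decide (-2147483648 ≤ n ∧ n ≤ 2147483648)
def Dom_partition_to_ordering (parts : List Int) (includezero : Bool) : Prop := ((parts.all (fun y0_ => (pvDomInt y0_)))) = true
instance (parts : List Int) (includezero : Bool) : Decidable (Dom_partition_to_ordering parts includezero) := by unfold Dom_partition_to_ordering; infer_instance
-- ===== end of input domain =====

-- B replaces the pair sort by dict bucketing over values plus a sort of the distinct keys (alternative decomposition, same results).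

-- ===== PORT A =====
def partition_to_ordering (parts : List Int) (includezero : Bool) : List Int :=
  let num_items := parts.length
  let num_parts := (PySem.Set.ofList parts).length
  let sorted_items := PySem.List.sorted (PySem.List.enumerate parts) (fun x => x.2) false
  if includezero then
    let sorted_ixs := sorted_items.map (fun x => x.1)
    let sorted_parts := sorted_items.map (fun x => x.2)
    sorted_ixs
  else
    let sorted_ixs := (sorted_items.filter (fun x => decide (x.2 > 0))).map (fun x => x.1)
    sorted_ixs

-- ===== PORT B =====
def partition_to_ordering_alt (parts : List Int) (includezero : Bool) : List Int :=
  let buckets := (PySem.List.enumerate parts).foldl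
      (fun d p => d.modify p.2 [] (fun xs => xs ++ [p.1])) PySem.Dict.empty
  let ks := PySem.List.sorted buckets.keys (fun v => v) false
  ks.foldl (fun out v => if includezero || decide (v > 0) then out ++ buckets.getD v [] else out) []

-- ===== PRECONDITION & SPEC =====
def Spec_partition_to_ordering (parts : List Int) (includezero : Bool) (out : List Int) : Prop := out = partition_to_ordering_alt parts includezero
instance (parts : List Int) (includezero : Bool) (out : List Int) : Decidable (Spec_partition_to_ordering parts includezero out) := by unfold Spec_partition_to_ordering; infer_instance

-- ===== CLAIM (what is proved, stated in full; the proofs are below) =====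
def Claim_equal_partition_to_ordering : Prop := ∀ (parts : List Int) (includezero : Bool), Dom_partition_to_ordering parts includezero → Spec_partition_to_ordering parts includezero (partition_to_ordering parts includezero)

-- ===== LEMMAS AND PROOFS =====

-- flatMap respects pointwise-on-members equality of the group function
lemma flatMap_congr_mem {a b : Type} (l : List a) (f g : a  →  List b)
    (h : ∀ c, c ∈ l  →  f c = g c) : l.flatMap f = l.flatMap g := by
  induction l with
  | nil => rfl
  | cons x t ih =>
    simp only [List.flatMap_cons, h x (List.mem_cons_self), ih (fun c hc => h c (List.mem_cons_of_mem _ hc))]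

-- dropping the empty groups of a guarded flatMap = flatMap over the filtered index list
lemma flatMap_ite_nil {a b : Type} (p : a  →  Bool) (f : a  →  List b) (l : List a) :
    (l.flatMap (fun c => if p c then f c else [])) = (l.filter p).flatMap f := by
  induction l with
  | nil => rfl
  | cons x t ih =>
    by_cases hp : p x <;> simp [hp, ih]

-- insertBy drops x exactly between a not-before prefix and a before suffix
lemma insertBy_split {a : Type} (before : a  →  a  →  Bool) (x : a) (ys1 ys2 : List a)
    (h1 : ∀ y ∈ ys1, before x y = false) (h2 : ∀ y ∈ ys2, before x y = true) :
    PySem.List.insertBy before x (ys1 ++ ys2) = ys1 ++ x :: ys2 := by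
  induction ys1 with
  | nil =>
    cases ys2 with
    | nil => rfl
    | cons z zs => simp [PySem.List.insertBy, h2 z (List.mem_cons_self)]
  | cons c t ih =>
    have hc : before x c = false := h1 c (List.mem_cons_self)
    simp only [List.cons_append, PySem.List.insertBy, hc, Bool.false_eq_true, if_false]
    exact congrArg (c :: ·) (ih (fun y hy => h1 y (List.mem_cons_of_mem _ hy)))

-- a strictly increasing list splits at any member into the strictly-smaller and strictly-larger parts
lemma pairwise_split (k0 : Int) : ∀ (ks : List Int), ks.Pairwise (· < ·)  →  k0 ∈ ks  → 
    ks = ks.filter (fun c => decide (c < k0)) ++ k0 :: ks.filter (fun c => decide (k0 < c)) := by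
  intro ks
  induction ks with
  | nil => simp
  | cons a t ih =>
    intro hp hm
    rcases List.pairwise_cons.mp hp with ⟨hlt, hpt⟩
    rcases List.mem_cons.mp hm with rfl | hmt
    · have hf1 : t.filter (fun c => decide (c < k0)) = [] := by
        rw [List.filter_eq_nil_iff]
        intro c hc
        have := hlt c hc
        simp; omega
      have hf2 : t.filter (fun c => decide (k0 < c)) = t := by
        rw [List.filter_eq_self]
        intro c hc
        have := hlt c hc
        simpa
      simp [hf1, hf2]
    · have hak : a < k0 := hlt _ hmt
      have hrec := ih hpt hmt
      have h1 : decide (a < k0) = true := by simpa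
      have h2 : decide (k0 < a) = false := by simp; omega
      simp only [List.filter_cons, h1, h2, if_true, List.cons_append]
      exact congrArg (a :: ·) hrec

-- CORE: Python's stable sort of pairs by second component equals the concatenation of
-- the original-order groups taken over the sorted distinct values
lemma sorted_eq_groups (l : List (Int × Int)) :
    PySem.List.sorted l (fun p => p.2) false
      = (PySem.List.sorted (PySem.Set.ofList (l.map (fun p => p.2))) (fun c => c) false).flatMap
          (fun c => l.filter (fun p => p.2 == c)) := by
  induction l using List.reverseRecOn with
  | nil => rfl
  | append_singleton l x ih =>
    classical
    set k0 : Int := x.2 with hk0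
    set g : Int  →  List (Int × Int) := fun c => l.filter (fun p => p.2 == c) with hg
    set g' : Int  →  List (Int × Int) := fun c => (l ++ [x]).filter (fun p => p.2 == c) with hg'
    set s : PySem.Set Int := PySem.Set.ofList (l.map (fun p => p.2)) with hs
    set s' : PySem.Set Int := PySem.Set.ofList ((l ++ [x]).map (fun p => p.2)) with hs'
    set ks : List Int := PySem.List.sorted s (fun c => c) false with hks
    set ks' : List Int := PySem.List.sorted s' (fun c => c) false with hks'
    set A : List Int := ks'.filter (fun c => decide (c < k0)) with hA
    set B : List Int := ks'.filter (fun c => decide (k0 < c)) with hB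
    have hpw' : ks'.Pairwise (· < ·) := PySem.List.sorted_ofList_pairwise_lt _
    have hmem' : k0 ∈ ks' := by
      rw [hks', PySem.List.mem_sorted, hs', PySem.Set.mem_ofList]
      simp [hk0]
    have hsplit' : ks' = A ++ k0 :: B := pairwise_split k0 ks' hpw' hmem'
    -- membership facts about A and B
    have hAlt : ∀ c ∈ A, c < k0 := by
      intro c hc; have := (List.mem_filter.mp hc).2; simpa using this
    have hBgt : ∀ c ∈ B, k0 < c := by
      intro c hc; have := (List.mem_filter.mp hc).2; simpa using this
    -- s' in terms of s
    have hs'add : s' = s.add k0 := by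
      rw [hs', hs, hk0]
      simp [PySem.Set.ofList, List.foldl_append]
    -- relate ks to A and B
    have hkseq : ks.flatMap g = A.flatMap g ++ (g k0 ++ B.flatMap g) := by
      by_cases hmem : k0 ∈ l.map (fun p => p.2)
      · -- value already present: the key set (hence ks) is unchanged
        have hcont : s.contains k0 = true :=
          List.elem_eq_true_of_mem ((PySem.Set.mem_ofList _ _).mpr hmem)
        have : s' = s := by rw [hs'add]; simp only [PySem.Set.add, hcont, if_true]
        have hks'ks : ks' = ks := by rw [hks', hks, this]
        rw [← hks'ks, hsplit']
        simp
      · -- new value: ks = A ++ B and its group is empty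
        have hcont : s.contains k0 = false := by
          rw [Bool.eq_false_iff]
          intro hcc
          exact hmem ((PySem.Set.mem_ofList _ _).mp (List.mem_of_elem_eq_true hcc))
        have hsapp : s' = s ++ [k0] := by
          rw [hs'add]; simp only [PySem.Set.add, hcont, Bool.false_eq_true, if_false]
        have hgk0 : g k0 = [] := by
          rw [hg, List.filter_eq_nil_iff]
          intro p hp hpk
          exact hmem (by
            have : p.2 = k0 := by simpa using hpk
            exact this ▸ List.mem_map_of_mem hp)
        have hperm : (A ++ B).Perm s := by
          have p1 : ks'.Perm s' := PySem.List.sorted_perm _ _ _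
          have p2 : (A ++ k0 :: B).Perm (s ++ [k0]) := by rw [← hsplit', ← hsapp]; exact p1
          have p3 : (A ++ k0 :: B).Perm (k0 :: (A ++ B)) := List.perm_middle
          have p4 : (s ++ [k0]).Perm (k0 :: s) := List.perm_append_comm
          exact (List.Perm.cons_inv ((p3.symm.trans p2).trans p4))
        have hpwAB : (A ++ B).Pairwise (· < ·) := by
          rw [List.pairwise_append]
          refine ⟨hpw'.sublist List.filter_sublist, hpw'.sublist List.filter_sublist, ?_⟩
          intro a ha b hb
          exact lt_trans (hAlt a ha) (hBgt b hb)
        have hksAB : ks = A ++ B := by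
          rw [hks]
          exact PySem.List.sorted_eq_of_perm_of_pairwise_lt _ _ _ hperm hpwAB
        rw [hksAB, hgk0]
        simp
    -- the insertion step
    have hsortapp : PySem.List.sorted (l ++ [x]) (fun p => p.2) false
        = PySem.List.insertBy (fun a b => decide (a.2 < b.2)) x
            (PySem.List.sorted l (fun p => p.2) false) := by
      rw [PySem.List.sorted_eq_foldl_insertBy, PySem.List.sorted_eq_foldl_insertBy, List.foldl_append]
      rfl
    have hsnd_g : ∀ c y, y ∈ g c  →  y.2 = c := by
      intro c y hy
      have := (List.mem_filter.mp hy).2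
      simpa using this
    have h1 : ∀ y ∈ (A.flatMap g ++ g k0), (fun (a b : Int × Int) => decide (a.2 < b.2)) x y = false := by
      intro y hy
      rcases List.mem_append.mp hy with hy1 | hy2
      · rcases List.mem_flatMap.mp hy1 with ⟨c, hcA, hyg⟩
        have := hsnd_g c y hyg
        have := hAlt c hcA
        simp; omega
      · have := hsnd_g k0 y hy2
        simp; omega
    have h2 : ∀ y ∈ B.flatMap g, (fun (a b : Int × Int) => decide (a.2 < b.2)) x y = true := by
      intro y hy
      rcases List.mem_flatMap.mp hy with ⟨c, hcB, hyg⟩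
      have := hsnd_g c y hyg
      have := hBgt c hcB
      simp; omega
    have hins : PySem.List.insertBy (fun (a b : Int × Int) => decide (a.2 < b.2)) x (ks.flatMap g)
        = (A.flatMap g ++ g k0) ++ x :: B.flatMap g := by
      rw [hkseq, ← List.append_assoc]
      exact insertBy_split _ x _ _ h1 h2
    -- the right-hand side over ks'
    have hg'A : A.flatMap g' = A.flatMap g := by
      refine flatMap_congr_mem _ _ _ ?_
      intro c hc
      have hck : c < k0 := hAlt c hc
      show (l ++ [x]).filter (fun p => p.2 == c) = l.filter (fun p => p.2 == c)
      rw [List.filter_append]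
      have : [x].filter (fun p => p.2 == c) = [] := by
        simp [hk0.symm]
        omega
      rw [this, List.append_nil]
    have hg'B : B.flatMap g' = B.flatMap g := by
      refine flatMap_congr_mem _ _ _ ?_
      intro c hc
      have hck : k0 < c := hBgt c hc
      show (l ++ [x]).filter (fun p => p.2 == c) = l.filter (fun p => p.2 == c)
      rw [List.filter_append]
      have : [x].filter (fun p => p.2 == c) = [] := by
        simp [hk0.symm]
        omega
      rw [this, List.append_nil]
    have hg'k0 : g' k0 = g k0 ++ [x] := by
      show (l ++ [x]).filter (fun p => p.2 == k0) = l.filter (fun p => p.2 == k0) ++ [x]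
      rw [List.filter_append]
      congr 1
      simp [hk0]
    calc PySem.List.sorted (l ++ [x]) (fun p => p.2) false
        = PySem.List.insertBy (fun a b => decide (a.2 < b.2)) x (ks.flatMap g) := by
          rw [hsortapp, ih]
      _ = (A.flatMap g ++ g k0) ++ x :: B.flatMap g := hins
      _ = A.flatMap g' ++ (g' k0 ++ B.flatMap g') := by
          rw [hg'A, hg'B, hg'k0]; simp
      _ = ks'.flatMap g' := by rw [hsplit']; simp

-- keys of the bucket dict = the distinct partition values in first-occurrence order
lemma buckets_keys (parts : List Int) :
    ((PySem.List.enumerate parts).foldl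
        (fun d p => d.modify p.2 [] (fun xs => xs ++ [p.1]))
        (PySem.Dict.empty : PySem.Dict Int (List Int))).keys
      = PySem.Set.ofList parts := by
  have h := PySem.Dict.keys_foldl_modify_key (PySem.List.enumerate parts) (fun p => p.2)
      ([] : List Int) (fun _ p xs => xs ++ [p.1]) (PySem.Dict.empty : PySem.Dict Int (List Int))
  rw [PySem.List.map_snd_enumerate] at h
  have h2 : PySem.Set.update (PySem.Dict.empty : PySem.Dict Int (List Int)).keys parts
      = PySem.Set.ofList parts := by
    rw [PySem.Set.update_eq_append_filter]
    simp [PySem.Dict.empty, PySem.Dict.keys]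
  exact h.trans h2

-- a bucket's content = the indices of its value, in original order
lemma buckets_getD (parts : List Int) (c : Int) :
    ((PySem.List.enumerate parts).foldl
        (fun d p => d.modify p.2 [] (fun xs => xs ++ [p.1]))
        (PySem.Dict.empty : PySem.Dict Int (List Int))).getD c []
      = ((PySem.List.enumerate parts).filter (fun p => p.2 == c)).map (fun p => p.1) := by
  have hfold : (PySem.List.enumerate parts).foldl
      (fun d p => d.modify p.2 [] (fun xs => xs ++ [p.1]))
      (PySem.Dict.empty : PySem.Dict Int (List Int))
      = ((PySem.List.enumerate parts).map Prod.swap).foldl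
          (fun d q => d.modify q.1 [] (fun xs => xs ++ [q.2])) PySem.Dict.empty := by
    rw [List.foldl_map]
    simp
  rw [hfold, PySem.Dict.getD_foldl_modify_append]
  simp [List.filter_map, Function.comp_def]

-- a value-group filtered by positivity is itself or empty
lemma filter_pos_group (l : List (Int × Int)) (c : Int) :
    (l.filter (fun p => p.2 == c)).filter (fun p => decide (p.2 > 0))
      = if decide (c > 0) then l.filter (fun p => p.2 == c) else [] := by
  by_cases hc : c > 0
  · rw [if_pos (by simpa using hc), List.filter_eq_self]
    intro p hp
    have : p.2 = c := by simpa using (List.mem_filter.mp hp).2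
    simp [this]; omega
  · rw [if_neg (by simpa using hc), List.filter_eq_nil_iff]
    intro p hp
    have : p.2 = c := by simpa using (List.mem_filter.mp hp).2
    simp [this]; omega

lemma main_eq (parts : List Int) (includezero : Bool) :
    partition_to_ordering parts includezero = partition_to_ordering_alt parts includezero := by
  simp only [partition_to_ordering, partition_to_ordering_alt, buckets_keys, buckets_getD]
  cases includezero with
  | true =>
    simp only [if_true, Bool.true_or, sorted_eq_groups, PySem.List.map_snd_enumerate,
      List.map_flatMap, PySem.List.foldl_append_eq_flatMap, List.nil_append]
  | false =>
    simp only [Bool.false_or, sorted_eq_groups, PySem.List.map_snd_enumerate,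
      List.filter_flatMap, List.map_flatMap, filter_pos_group]
    rw [PySem.List.foldl_if_eq_foldl_filter (fun v => decide (v > 0))
      (fun out v => out ++ ((PySem.List.enumerate parts).filter (fun p => p.2 == v)).map (fun p => p.1))]
    rw [PySem.List.foldl_append_eq_flatMap, List.nil_append, ← flatMap_ite_nil]
    refine flatMap_congr_mem _ _ _ ?_
    intro c _
    by_cases hc : decide (c > 0) = true <;> simp [hc]

-- ===== VERDICT (by name: the statement is the Claim_ definition above) =====
theorem partition_to_ordering_spec : Claim_equal_partition_to_ordering := by
  intro parts includezero _
  exact main_eq parts includezero
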